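-- pv_equiv track=rewrite | github.com/itscomputers/advent | day08.py | node_sum
-- ===== SOURCE A (Python) =====
-- def node_sum(data, problem):
--     [c, m, *data] = data
--     if c == 0:
--         return data[m:], sum(data[:m])
--
--     sums = []
--     for i in range(c):
--         data, meta_sum = node_sum(data, problem)
--         sums.append(meta_sum)
--
--     if problem == 1:
--         return data[m:], sum(sums) + sum(data[:m])
--     else:
--         return data[m:], sum(sums[i-1] for i in data[:m] if i <= c)
-- ===== SOURCE B (Python) =====
-- def node_sum(data, problem):
--     # Iterative explicit-stack evaluator: scan headers left to right; a frame
--     # holds (children remaining, child count, metadata count, child values).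
--     stack = []
--     while True:
--         c, m, data = data[0], data[1], data[2:]
--         stack.append([c, c, m, []])
--         while stack[-1][0] <= 0:
--             _, c, m, sums = stack.pop()
--             meta, data = data[:m], data[m:]
--             if problem == 1 or c == 0:
--                 v = sum(sums) + sum(meta)
--             else:
--                 v = sum(sums[i - 1] for i in meta if i <= c)
--             if not stack:
--                 return data, v
--             stack[-1][0] -= 1
--             stack[-1][3].append(v)
-- ===== Notes on version B (the rewrite author's own statement) =====
-- stated objective: alternative
-- what changed: Replaces A's recursive descent with an iterative explicit-stack evaluator that scans headers left to right (frames hold remaining-children count, header, and child values); Pre_ excludes only inputs on which A raises (truncated header unpacking, or an out-of-range sums[i-1] metadata reference).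
import Mathlib
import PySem

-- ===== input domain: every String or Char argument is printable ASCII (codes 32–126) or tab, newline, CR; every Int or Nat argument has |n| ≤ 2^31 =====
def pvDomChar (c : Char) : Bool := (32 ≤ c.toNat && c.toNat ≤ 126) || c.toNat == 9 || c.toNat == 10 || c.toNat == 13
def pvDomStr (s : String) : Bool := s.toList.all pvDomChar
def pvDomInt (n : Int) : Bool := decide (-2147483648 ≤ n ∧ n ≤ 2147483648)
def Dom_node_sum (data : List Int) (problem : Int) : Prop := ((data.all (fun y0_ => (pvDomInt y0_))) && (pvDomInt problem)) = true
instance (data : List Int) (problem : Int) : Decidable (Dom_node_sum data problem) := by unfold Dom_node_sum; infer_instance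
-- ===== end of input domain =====

-- B replaces A's recursive descent with an iterative explicit-stack evaluator;
-- return value only (neither version mutates its arguments).

-- shared transliteration of the generator `sum(sums[i-1] for i in mta if i <= c)`
-- that appears verbatim in both Python sources
def gsum (sums : List Int) (c : Int) (mta : List Int) : Int :=
  mta.foldl (fun acc i => if i ≤ c then acc + ((PySem.List.pyGet? sums (i - 1)).getD 0) else acc) 0

-- ===== PORT A =====
-- fueled transliteration of A's recursion (fuel = data.length suffices under Pre_;
-- the fuel-0 / short-list defaults correspond to inputs where the Python raises,
-- all excluded by Pre_node_sum)
mutual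
def nodeSumA : Nat → List Int → Int → List Int × Int
  | 0, data, _ => (data, 0)
  | f + 1, data, problem =>
    match data with
    | c :: m :: d0 =>
      if c = 0 then
        (PySem.List.slice d0 (some m) none, (PySem.List.slice d0 none (some m)).sum)
      else
        let r := loopA f problem c.toNat d0 []
        if problem = 1 then
          (PySem.List.slice r.1 (some m) none,
           r.2.sum + (PySem.List.slice r.1 none (some m)).sum)
        else
          (PySem.List.slice r.1 (some m) none,
           gsum r.2 c (PySem.List.slice r.1 none (some m)))
    | _ => (data, 0)
  termination_by f _ _ => (f, 0)

def loopA : Nat → Int → Nat → List Int → List Int → List Int × List Int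
  | _, _, 0, d, sums => (d, sums)
  | f, problem, k + 1, d, sums =>
    let r := nodeSumA f d problem
    loopA f problem k r.1 (sums ++ [r.2])
  termination_by f _ k _ _ => (f, k + 1)
end

def node_sum (data : List Int) (problem : Int) : List Int × Int :=
  nodeSumA data.length data problem

-- ===== PORT B =====
structure BFrame where
  rem : Int
  c : Int
  m : Int
  sums : List Int
deriving DecidableEq, Repr

-- `v = sum(sums) + sum(meta)` / the generator, as B computes it
def valueB (p c : Int) (sums mta : List Int) : Int :=
  if p = 1 ∨ c = 0 then sums.sum + mta.sum else gsum sums c mta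

-- inner `while stack[-1][0] <= 0` loop; .inl = `return`, .inr = back to the outer loop.
-- The fuel argument is always called with (stack length); it only makes the
-- recursion structural and is never exhausted.
def innerB (p : Int) : Nat → List Int → List BFrame → (List Int × Int) ⊕ (List Int × List BFrame)
  | 0, d, _ => .inl (d, 0)
  | _ + 1, d, [] => .inl (d, 0)       -- unreachable: the stack is never empty here
  | fu + 1, d, f :: s =>
    if f.rem ≤ 0 then
      let mta := PySem.List.slice d none (some f.m)
      let d' := PySem.List.slice d (some f.m) none
      let v := valueB p f.c f.sums mta
      match s with
      | [] => .inl (d', v)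
      | g :: s' => innerB p fu d' ({ g with rem := g.rem - 1, sums := g.sums ++ [v] } :: s')
    else .inr (d, f :: s)

-- outer `while True` loop; reading the two header entries is the list pattern
-- match; one unit of fuel per header read (data.length + 1 at the top level is
-- always enough under Pre_node_sum; fuel 0 is unreachable there)
def outerB (p : Int) : Nat → List Int → List BFrame → List Int × Int
  | 0, d, _ => (d, 0)
  | fb + 1, data, stack =>
    match data with
    | c :: m :: rest =>
      (match innerB p (stack.length + 1) rest (⟨c, c, m, []⟩ :: stack) with
       | .inl r => r
       | .inr (d', st') => outerB p fb d' st')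
    | d => (d, 0)                        -- `data[0]`/`data[1]` raised: excluded by Pre_node_sum

def node_sum_alt (data : List Int) (problem : Int) : List Int × Int :=
  outerB problem (data.length + 1) data []

-- ===== PRECONDITION & SPEC =====
-- grammar check: does `data` start with a well-formed tree encoding (and, for
-- problem ≠ 1, metadata references that stay inside the child-value list)?
-- It consumes exactly what A consumes but computes no sums.
mutual
def chk : Nat → List Int → Int → Option (List Int)
  | 0, _, _ => none
  | f + 1, data, p =>
    match data with
    | c :: m :: d0 =>
      if c = 0 then some (PySem.List.slice d0 (some m) none)
      else if c < 0 then
        if p ≠ 1 ∧ (PySem.List.slice d0 none (some m)).any (fun i => decide (i ≤ c)) then none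
        else some (PySem.List.slice d0 (some m) none)
      else
        match chkCh f c.toNat d0 p with
        | some d =>
          if p = 1 then some (PySem.List.slice d (some m) none)
          else if (PySem.List.slice d none (some m)).all
              (fun i => decide (c < i) || decide (1 - c ≤ i)) then
            some (PySem.List.slice d (some m) none)
          else none
        | none => none
    | _ => none

def chkCh : Nat → Nat → List Int → Int → Option (List Int)
  | _, 0, d, _ => some d
  | 0, _ + 1, _, _ => none
  | f + 1, k + 1, d, p =>
    match chk f d p with
    | some d1 => chkCh f k d1 p
    | none => none
end

-- Pre_ excludes exactly the inputs on which the Python A raises: a header that runs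
-- past the end of the list (ValueError on unpacking), and, for problem ≠ 1, a
-- metadata entry that makes `sums[i-1]` an out-of-range index (IndexError).
def Pre_node_sum (data : List Int) (problem : Int) : Prop :=
  (chk (data.length + 1) data problem).isSome = true

instance (data : List Int) (problem : Int) : Decidable (Pre_node_sum data problem) := by
  unfold Pre_node_sum; infer_instance

def pvWitness_node_sum : List Int × Int := ([1, 1, 0, 1, 7, 1], 2)

def Spec_node_sum (data : List Int) (problem : Int) (out : List Int × Int) : Prop :=
  out = node_sum_alt data problem
instance (data : List Int) (problem : Int) (out : List Int × Int) : Decidable (Spec_node_sum data problem out) := by unfold Spec_node_sum; infer_instance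

-- ===== CLAIM (what is proved, stated in full; the proofs are below) =====
def Claim_equal_node_sum : Prop := ∀ (data : List Int) (problem : Int), Dom_node_sum data problem → Pre_node_sum data problem → Spec_node_sum data problem (node_sum data problem)

-- ===== LEMMAS AND PROOFS =====

-- proof-only helper: the number of elements `d[:m]` takes
def metaK (m n : Int) : Int := if 0 ≤ m then min m n else max 0 (n + m)

theorem drop_metaK (d : List Int) (m : Int) :
    d.drop ((metaK m (d.length : Int)).toNat) = PySem.List.slice d (some m) none := by
  by_cases hm : 0 ≤ m
  · have hk : (metaK m (d.length : Int)).toNat = min m.toNat d.length := by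
      unfold metaK; split <;> omega
    rw [PySem.List.slice_from d hm, hk]
    rcases le_total m.toNat d.length with h | h
    · rw [min_eq_left h]
    · rw [min_eq_right h, List.drop_length, List.drop_eq_nil_of_le h]
  · have h0 : 0 < (-m).toNat := by omega
    have hk : (metaK m (d.length : Int)).toNat = d.length - (-m).toNat := by
      unfold metaK; split <;> omega
    have hm' : m = -(((-m).toNat : Nat) : Int) := by omega
    rw [hk, hm', PySem.List.slice_from_neg_natCast d _ h0]
    congr 1
    omega

theorem slice_from_len_le (d : List Int) (m : Int) :
    (PySem.List.slice d (some m) none).length ≤ d.length := by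
  rw [← drop_metaK]; simp

-- consumption bound for the grammar check
theorem chk_len : ∀ fc : Nat,
    (∀ (d : List Int) (p : Int) (r : List Int), chk fc d p = some r → r.length + 2 ≤ d.length) ∧
    (∀ (k : Nat) (d : List Int) (p : Int) (d' : List Int), chkCh fc k d p = some d' → d'.length ≤ d.length) := by
  intro fc
  induction fc using Nat.strong_induction_on with
  | _ fc ih =>
    have hslice : ∀ (d0 : List Int) (m : Int), (PySem.List.slice d0 (some m) none).length ≤ d0.length :=
      slice_from_len_le
    have hA : ∀ (d : List Int) (p : Int) (r : List Int), chk fc d p = some r → r.length + 2 ≤ d.length := by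
      intro d p r h
      match fc, d with
      | 0, _ => simp [chk] at h
      | f + 1, [] => simp [chk] at h
      | f + 1, [c] => simp [chk] at h
      | f + 1, c :: m :: d0 =>
        rw [chk] at h
        by_cases hc0 : c = 0
        · rw [if_pos hc0] at h
          injection h with h
          subst h
          have := hslice d0 m
          simp only [List.length_cons]
          omega
        · rw [if_neg hc0] at h
          by_cases hcn : c < 0
          · rw [if_pos hcn] at h
            split_ifs at h
            injection h with h
            subst h
            have := hslice d0 m
            simp only [List.length_cons]
            omega
          · rw [if_neg hcn] at h
            cases hch : chkCh f c.toNat d0 p with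
            | none => rw [hch] at h; simp at h
            | some dmid =>
              rw [hch] at h
              dsimp only at h
              have h2 : dmid.length ≤ d0.length := (ih f (by omega)).2 c.toNat d0 p dmid hch
              have h3 := hslice dmid m
              split_ifs at h <;> (injection h with h; subst h; simp only [List.length_cons]; omega)
    refine ⟨hA, ?_⟩
    intro k d p d' h
    match fc, k with
    | fc, 0 =>
      rw [chkCh] at h
      injection h with h
      subst h
      exact le_rfl
    | 0, k + 1 => simp [chkCh] at h
    | f + 1, k + 1 =>
      rw [chkCh] at h
      cases hc : chk f d p with
      | none => rw [hc] at h; simp at h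
      | some d1 =>
        rw [hc] at h
        have hl1 := (ih f (by omega)).1 d p d1 hc
        have hl2 := (ih f (by omega)).2 k d1 p d' h
        omega

-- proof-only continuation: what the machine does after finishing one whole node
def resume (p : Int) (fu : Nat) (rest : List Int) (v : Int) (stack : List BFrame) : List Int × Int :=
  match stack with
  | [] => (rest, v)
  | g :: s =>
    match innerB p (s.length + 1) rest ({ g with rem := g.rem - 1, sums := g.sums ++ [v] } :: s) with
    | .inl r => r
    | .inr (d', st') => outerB p fu d' st'

theorem outerB_cons (p : Int) (fb : Nat) (c m : Int) (rest : List Int) (stack : List BFrame) :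
    outerB p (fb + 1) (c :: m :: rest) stack =
      match innerB p (stack.length + 1) rest (⟨c, c, m, []⟩ :: stack) with
      | .inl r => r
      | .inr (d', st') => outerB p fb d' st' := rfl

theorem complete_resume (p : Int) (fu : Nat) (d : List Int) (c m : Int) (sums : List Int) (rem : Int)
    (hrem : rem ≤ 0) (stack : List BFrame) :
    (match innerB p (stack.length + 1) d (⟨rem, c, m, sums⟩ :: stack) with
     | .inl r => r
     | .inr (d', st') => outerB p fu d' st') =
    resume p fu (PySem.List.slice d (some m) none)
      (valueB p c sums (PySem.List.slice d none (some m))) stack := by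
  rw [innerB, if_pos (show (⟨rem, c, m, sums⟩ : BFrame).rem ≤ 0 from hrem)]
  cases stack with
  | nil => rw [resume]
  | cons g s' =>
    dsimp only
    rw [resume, List.length_cons]

def Part1 (fc : Nat) : Prop := ∀ (d : List Int) (p : Int) (rest : List Int) (fa : Nat),
  chk fc d p = some rest → d.length ≤ fa →
  ∃ v, nodeSumA fa d p = (rest, v) ∧
    ∀ (fb : Nat) (stack : List BFrame), d.length ≤ 2 * (fb + 1) →
      ∃ fu t, fb + 1 = fu + t ∧ 2 * t + rest.length ≤ d.length ∧
        outerB p (fb + 1) d stack = resume p fu rest v stack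

def Part2 (fc : Nat) : Prop := ∀ (k : Nat) (d : List Int) (p : Int) (d' : List Int) (fa : Nat) (sums : List Int),
  chkCh fc k d p = some d' → d.length ≤ fa →
  ∃ vs, loopA fa p k d sums = (d', sums ++ vs) ∧
    (1 ≤ k → ∀ (fb : Nat) (c m : Int) (stack : List BFrame), d.length ≤ 2 * (fb + 1) →
      ∃ fu t, fb + 1 = fu + t ∧ 2 * t + d'.length ≤ d.length ∧
        outerB p (fb + 1) d (⟨(k : Int), c, m, sums⟩ :: stack) =
          resume p fu (PySem.List.slice d' (some m) none)
            (valueB p c (sums ++ vs) (PySem.List.slice d' none (some m))) stack)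

theorem chkCh_len_pos (f k : Nat) (d : List Int) (p : Int) (d' : List Int)
    (h : chkCh f (k + 1) d p = some d') : d'.length + 2 ≤ d.length := by
  match f with
  | 0 => simp [chkCh] at h
  | f + 1 =>
    rw [chkCh] at h
    cases hc : chk f d p with
    | none => rw [hc] at h; simp at h
    | some d1 =>
      rw [hc] at h
      have h1 := (chk_len f).1 d p d1 hc
      have h2 := (chk_len f).2 k d1 p d' h
      omega

theorem main : ∀ fc : Nat, Part1 fc ∧ Part2 fc := by
  intro fc
  induction fc using Nat.strong_induction_on with
  | _ fc ih =>
    have h1 : Part1 fc := by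
      intro d p rest fa hchk hfa
      match fc, d with
      | 0, _ => simp [chk] at hchk
      | f + 1, [] => simp [chk] at hchk
      | f + 1, [c] => simp [chk] at hchk
      | f + 1, c :: m :: d0 =>
        simp only [List.length_cons] at hfa
        obtain ⟨fa0, rfl⟩ : ∃ t, fa = t + 1 := ⟨fa - 1, by omega⟩
        rw [chk] at hchk
        by_cases hc0 : c = 0
        · rw [if_pos hc0] at hchk
          injection hchk with hrest
          refine ⟨(PySem.List.slice d0 none (some m)).sum, ?_, ?_⟩
          · rw [nodeSumA, if_pos hc0, hrest]
          · intro fb stack hfb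
            have hrl : rest.length ≤ d0.length := by
              rw [← hrest]; exact slice_from_len_le d0 m
            refine ⟨fb, 1, by omega, by simp only [List.length_cons]; omega, ?_⟩
            rw [outerB_cons,
              complete_resume p fb d0 c m [] c (by omega) stack, hrest]
            congr 1
            subst hc0
            simp [valueB]
        · rw [if_neg hc0] at hchk
          by_cases hcn : c < 0
          · rw [if_pos hcn] at hchk
            split_ifs at hchk
            injection hchk with hrest
            have hton : c.toNat = 0 := by omega
            refine ⟨if p = 1 then ([] : List Int).sum + (PySem.List.slice d0 none (some m)).sum
                    else gsum [] c (PySem.List.slice d0 none (some m)), ?_, ?_⟩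
            · rw [nodeSumA, if_neg hc0]
              dsimp only
              rw [hton]
              simp only [loopA]
              by_cases hp : p = 1
              · rw [if_pos hp, if_pos hp, hrest]
              · rw [if_neg hp, if_neg hp, hrest]
            · intro fb stack hfb
              have hrl : rest.length ≤ d0.length := by
                rw [← hrest]; exact slice_from_len_le d0 m
              refine ⟨fb, 1, by omega, by simp only [List.length_cons]; omega, ?_⟩
              rw [outerB_cons,
                complete_resume p fb d0 c m [] c (by omega) stack, hrest]
              congr 1
              simp only [valueB, hc0, or_false]
          · rw [if_neg hcn] at hchk
            cases hch : chkCh f c.toNat d0 p with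
            | none => rw [hch] at hchk; simp at hchk
            | some dmid =>
              rw [hch] at hchk
              dsimp only at hchk
              have hrest : PySem.List.slice dmid (some m) none = rest := by
                by_cases hp : p = 1
                · rw [if_pos hp] at hchk; injection hchk
                · rw [if_neg hp] at hchk
                  by_cases hall : ((PySem.List.slice dmid none (some m)).all
                      fun i => decide (c < i) || decide (1 - c ≤ i)) = true
                  · rw [if_pos hall] at hchk; injection hchk
                  · rw [if_neg hall] at hchk; exact absurd hchk (by simp)
              obtain ⟨vs, hA2, hB2⟩ := (ih f (by omega)).2 c.toNat d0 p dmid fa0 [] hch (by omega)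
              refine ⟨if p = 1 then vs.sum + (PySem.List.slice dmid none (some m)).sum
                      else gsum vs c (PySem.List.slice dmid none (some m)), ?_, ?_⟩
              · rw [nodeSumA, if_neg hc0]
                dsimp only
                rw [hA2]
                simp only [List.nil_append]
                by_cases hp : p = 1
                · rw [if_pos hp, if_pos hp, hrest]
                · rw [if_neg hp, if_neg hp, hrest]
              · intro fb stack hfb
                simp only [List.length_cons] at hfb
                have hd0 : dmid.length + 2 ≤ d0.length := by
                  obtain ⟨kk, hkk⟩ : ∃ t, c.toNat = t + 1 := ⟨c.toNat - 1, by omega⟩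
                  rw [hkk] at hch
                  exact chkCh_len_pos f kk d0 p dmid hch
                obtain ⟨fb0, rfl⟩ : ∃ t, fb = t + 1 := ⟨fb - 1, by omega⟩
                obtain ⟨fu, t, hft, hbd, hEq⟩ := hB2 (by omega) fb0 c m stack (by omega)
                have hrl : rest.length ≤ dmid.length := by
                  rw [← hrest]; exact slice_from_len_le dmid m
                refine ⟨fu, t + 1, by omega, by simp only [List.length_cons]; omega, ?_⟩
                rw [outerB_cons, innerB,
                  if_neg (show ¬((⟨c, c, m, []⟩ : BFrame).rem ≤ 0) from by simp; omega)]
                dsimp only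
                rw [show (⟨c, c, m, ([] : List Int)⟩ : BFrame) = ⟨((c.toNat : Int)), c, m, []⟩ from by
                  rw [Int.toNat_of_nonneg (by omega)]]
                rw [hEq, hrest]
                congr 1
                simp only [List.nil_append, valueB, hc0, or_false]
    have h2 : Part2 fc := by
      intro k d p d' fa sums hch hfa
      match fc, k with
      | fc, 0 =>
        rw [chkCh] at hch
        injection hch with h
        subst h
        exact ⟨[], by simp [loopA], fun hk => absurd hk (by omega)⟩
      | 0, k + 1 => simp [chkCh] at hch
      | f + 1, k + 1 =>
        rw [chkCh] at hch
        cases hc1 : chk f d p with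
        | none => rw [hc1] at hch; simp at hch
        | some d1 =>
          rw [hc1] at hch
          dsimp only at hch
          obtain ⟨v1, hA1, hB1⟩ := (ih f (by omega)).1 d p d1 fa hc1 hfa
          have hd1 : d1.length + 2 ≤ d.length := (chk_len f).1 d p d1 hc1
          obtain ⟨vs', hA2, hB2⟩ := (ih f (by omega)).2 k d1 p d' fa (sums ++ [v1]) hch (by omega)
          refine ⟨v1 :: vs', ?_, ?_⟩
          · rw [loopA]
            rw [hA1]
            rw [hA2]
            simp
          · intro hk fb c m stack hfb
            obtain ⟨fu1, t1, hft1, hbd1, hEq1⟩ := hB1 fb (⟨(((k + 1 : Nat) : Int)), c, m, sums⟩ :: stack) hfb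
            rw [hEq1, resume]
            dsimp only
            rw [show (((k + 1 : Nat) : Int)) - 1 = ((k : Int)) from by push_cast; ring]
            cases Nat.eq_zero_or_pos k with
            | inl hk0 =>
              subst hk0
              rw [chkCh] at hch
              injection hch with h
              subst h
              have hvs : vs' = [] := by
                simp only [loopA] at hA2
                have := congrArg Prod.snd hA2
                simpa using this
              subst hvs
              refine ⟨fu1, t1, hft1, hbd1, ?_⟩
              rw [show ((0 : Nat) : Int) = ((0 : Int)) from rfl,
                complete_resume p fu1 d1 c m (sums ++ [v1]) 0 (by omega) stack]
            | inr hkpos =>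
              have hd1b : 2 ≤ d1.length := by
                obtain ⟨kk, hkk⟩ : ∃ t, k = t + 1 := ⟨k - 1, by omega⟩
                rw [hkk] at hch
                have := chkCh_len_pos f kk d1 p d' hch
                omega
              obtain ⟨fu0, rfl⟩ : ∃ x, fu1 = x + 1 := ⟨fu1 - 1, by omega⟩
              obtain ⟨fu2, t2, hft2, hbd2, hEq2⟩ := hB2 hkpos fu0 c m stack (by omega)
              refine ⟨fu2, t1 + t2, by omega, by omega, ?_⟩
              rw [innerB,
                if_neg (show ¬((⟨((k : Nat) : Int), c, m, sums ++ [v1]⟩ : BFrame).rem ≤ 0) from by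
                  show ¬(((k : Nat) : Int) ≤ 0); omega)]
              dsimp only
              rw [hEq2]
              simp [List.append_assoc]
    exact ⟨h1, h2⟩

-- ===== VERDICT (by name: the statement is the Claim_ definition above) =====
theorem node_sum_spec : Claim_equal_node_sum := by
  intro data problem _ hpre
  unfold Spec_node_sum
  cases hres : chk (data.length + 1) data problem with
  | none => unfold Pre_node_sum at hpre; rw [hres] at hpre; simp at hpre
  | some rest =>
    obtain ⟨v, hA, hB⟩ := (main (data.length + 1)).1 data problem rest data.length hres le_rfl
    obtain ⟨fu, t, -, -, hEq⟩ := hB data.length [] (by omega)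
    show node_sum data problem = node_sum_alt data problem
    rw [node_sum, node_sum_alt, hA, hEq, resume]
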